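-- pv_equiv track=rewrite | github.com/zloinc/telegram-rounder | processor.py | _curve_units
-- ===== SOURCE A (Python) =====
-- _TRAILING_CURVE_PUNCT = set(",.!?:;)]}\"»…")
--
-- def _curve_units(text: str) -> list[dict]:
--     units: list[dict] = []
--     for char in text:
--         if char.isspace():
--             if units and units[-1]["kind"] == "space":
--                 continue
--             units.append({"text": " ", "kind": "space"})
--             continue
--         if char in _TRAILING_CURVE_PUNCT:
--             for prev in reversed(units):
--                 if prev["kind"] == "text":
--                     prev["text"] += char
--                     break
--             else:
--                 units.append({"text": char, "kind": "text"})
--             continue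
--         units.append({"text": char, "kind": "text"})
--     return units
-- ===== SOURCE B (Python) =====
-- _TRAILING_CURVE_PUNCT = set(",.!?:;)]}\"»…")
--
-- def _curve_units(text: str) -> list[dict]:
--     # One pass with a deferred "pending last text unit" (last, trailing_space),
--     # flushed when a new word starts; no backward scan over units.
--     out: list[dict] = []
--     last = None            # text of the pending last text unit, or None
--     trailing_space = False  # a space unit follows the pending text unit
--     for ch in text:
--         if ch.isspace():
--             if last is None:
--                 if not out:
--                     out.append({"text": " ", "kind": "space"})
--             else:
--                 trailing_space = True
--         elif ch in _TRAILING_CURVE_PUNCT: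
--             if last is None:
--                 last = ch
--             else:
--                 last += ch
--         else:
--             if last is not None:
--                 out.append({"text": last, "kind": "text"})
--                 if trailing_space:
--                     out.append({"text": " ", "kind": "space"})
--                 trailing_space = False
--             last = ch
--     if last is not None:
--         out.append({"text": last, "kind": "text"})
--         if trailing_space:
--             out.append({"text": " ", "kind": "space"})
--     return out
-- ===== Notes on version B (the rewrite author's own statement) =====
-- stated objective: simpler
-- what changed: A scans reversed(units) and mutates an earlier dict in place to attach trailing punctuation; B keeps the pending last text unit and its trailing-space flag outside the list and flushes them when a new word starts, so no backward scan or in-place mutation is needed.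
import Mathlib
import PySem

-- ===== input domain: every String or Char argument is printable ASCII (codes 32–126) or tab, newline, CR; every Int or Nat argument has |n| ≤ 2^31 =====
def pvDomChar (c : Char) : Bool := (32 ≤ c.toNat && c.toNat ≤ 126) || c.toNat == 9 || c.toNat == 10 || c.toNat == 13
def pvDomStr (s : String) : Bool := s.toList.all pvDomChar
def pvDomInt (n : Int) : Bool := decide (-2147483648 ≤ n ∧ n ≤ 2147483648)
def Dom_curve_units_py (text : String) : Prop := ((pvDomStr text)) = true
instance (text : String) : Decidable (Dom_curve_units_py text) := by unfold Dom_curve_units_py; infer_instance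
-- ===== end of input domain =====

-- B replaces A's backward scan over the unit list (and its in-place mutation of an
-- earlier dict) with a single pass keeping the pending last text unit and its trailing
-- space outside the list, flushed when a new word starts; objective: simpler.

-- shared literal pieces: the two dict shapes A and B construct
def pvSpaceUnit : List (String × String) := [("text", " "), ("kind", "space")]

def pvTextUnit (s : String) : List (String × String) := [("text", s), ("kind", "text")]

-- u["kind"] (A only reads keys it has inserted, so the default is never used)
def pvKind (u : List (String × String)) : String :=
  match u.find? (fun p => p.1 == "kind") with
  | some p => p.2
  | none => ""

-- prev["text"] += char  (first-match update; dict keys are unique)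
def pvAddText (u : List (String × String)) (c : Char) : List (String × String) :=
  u.map (fun p => if p.1 == "text" then (p.1, p.2 ++ c.toString) else p)

def pvPunct (c : Char) : Bool :=
  [',', '.', '!', '?', ':', ';', ')', ']', '}', '"', '»', '…'].contains c

-- ===== PORT A =====
-- the reversed(units) for/else scan: first unit of kind "text" (from the back) gets the
-- char appended; none means the else branch fires
def pvAttachRev (rev : List (List (String × String))) (c : Char) :
    Option (List (List (String × String))) :=
  match rev with
  | [] => none
  | u :: rest =>
    if pvKind u == "text" then some (pvAddText u c :: rest)
    else (pvAttachRev rest c).map (u :: ·)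

def pvStepA (units : List (List (String × String))) (c : Char) :
    List (List (String × String)) :=
  if PySem.Chars.isspace c then
    if (match units.getLast? with | some u => pvKind u == "space" | none => false) then
      units
    else units ++ [pvSpaceUnit]
  else if pvPunct c then
    match pvAttachRev units.reverse c with
    | some rev => rev.reverse
    | none => units ++ [pvTextUnit c.toString]
  else units ++ [pvTextUnit c.toString]

def curve_units_py (text : String) : List (List (String × String)) :=
  text.toList.foldl pvStepA []

-- ===== PORT B =====
-- state: (out, last, trailing_space)
def pvStepB (st : List (List (String × String)) × Option String × Bool) (c : Char) :
    List (List (String × String)) × Option String × Bool :=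
  let (out, last, trailing) := st
  if PySem.Chars.isspace c then
    match last with
    | none => if out.isEmpty then (out ++ [pvSpaceUnit], last, trailing) else (out, last, trailing)
    | some _ => (out, last, true)
  else if pvPunct c then
    match last with
    | none => (out, some c.toString, trailing)
    | some s => (out, some (s ++ c.toString), trailing)
  else
    match last with
    | none => (out, some c.toString, trailing)
    | some s =>
      (out ++ [pvTextUnit s] ++ (if trailing then [pvSpaceUnit] else []), some c.toString, false)

def pvFlushB (st : List (List (String × String)) × Option String × Bool) :
    List (List (String × String)) :=
  match st with
  | (out, none, _) => out
  | (out, some s, trailing) => out ++ [pvTextUnit s] ++ (if trailing then [pvSpaceUnit] else [])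

def curve_units_py_alt (text : String) : List (List (String × String)) :=
  pvFlushB (text.toList.foldl pvStepB ([], none, false))

-- ===== PRECONDITION & SPEC =====
def Spec_curve_units_py (text : String) (out : List (List (String × String))) : Prop := out = curve_units_py_alt text
instance (text : String) (out : List (List (String × String))) : Decidable (Spec_curve_units_py text out) := by unfold Spec_curve_units_py; infer_instance

-- ===== CLAIM (what is proved, stated in full; the proofs are below) =====
def Claim_equal_curve_units_py : Prop := ∀ (text : String), Dom_curve_units_py text → Spec_curve_units_py text (curve_units_py text)

-- ===== LEMMAS AND PROOFS =====

-- invariant relating A's unit list to B's state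
def pvInv (units : List (List (String × String)))
    (st : List (List (String × String)) × Option String × Bool) : Prop :=
  units = pvFlushB st ∧
  (st.2.1 = none → (st.1 = [] ∨ st.1 = [pvSpaceUnit]) ∧ st.2.2 = false)

theorem pvInv_step (units : List (List (String × String)))
    (st : List (List (String × String)) × Option String × Bool) (c : Char)
    (h : pvInv units st) : pvInv (pvStepA units c) (pvStepB st c) := by
  obtain ⟨out, last, trailing⟩ := st
  obtain ⟨hu, hn⟩ := h
  subst hu
  cases last with
  | none =>
    obtain ⟨hout, htr⟩ := hn rfl
    subst htr
    rcases hout with h0 | h0 <;> subst h0 <;>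
      constructor <;>
      simp [pvStepA, pvStepB, pvFlushB, pvSpaceUnit, pvTextUnit, pvKind,
        pvAttachRev] <;>
      split_ifs <;> simp_all
  | some s =>
    cases trailing <;>
      constructor <;>
      simp [pvStepA, pvStepB, pvFlushB, pvSpaceUnit, pvTextUnit, pvKind,
        pvAttachRev, pvAddText, List.getLast?_append] <;>
      split_ifs <;> simp_all

theorem pvInv_foldl (cs : List Char)
    (units : List (List (String × String)))
    (st : List (List (String × String)) × Option String × Bool)
    (h : pvInv units st) : pvInv (cs.foldl pvStepA units) (cs.foldl pvStepB st) := by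
  induction cs generalizing units st with
  | nil => exact h
  | cons c cs ih => exact ih _ _ (pvInv_step _ _ _ h)

-- ===== VERDICT (by name: the statement is the Claim_ definition above) =====
theorem curve_units_py_spec : Claim_equal_curve_units_py := by
  intro text _
  have h := pvInv_foldl text.toList [] ([], none, false) (by simp [pvInv, pvFlushB])
  exact h.1
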